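-- pv_equiv track=rewrite | github.com/adrianogil/AlgoExercises | RandomStudy/python/emil_problem/emil_problem.py | get_best_answer
-- ===== SOURCE A (Python) =====
-- def get_best_answer(suitable_answers):
--     min_size = 10000000
--
--     for i in range(0, len(suitable_answers)):
--         if len(suitable_answers[i]) < min_size:
--             min_size = len(suitable_answers[i])
--
--     best_answers = []
--
--     for i in range(0, len(suitable_answers)):
--         if len(suitable_answers[i]) == min_size:
--             best_answers.append(suitable_answers[i])
--
--     best_answers = sorted(best_answers)
--
--     return best_answers[0]
-- ===== SOURCE B (Python) =====
-- def get_best_answer(suitable_answers):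
--     # One pass keeping the running best by the composite order (length, lexicographic).
--     # On an empty list this returns None where A raises IndexError (outside Pre_).
--     best = None
--     for s in suitable_answers:
--         if best is None or len(s) < len(best) or (len(s) == len(best) and s < best):
--             best = s
--     return best
-- ===== Notes on version B (the rewrite author's own statement) =====
-- stated objective: simpler
-- what changed: Replaces A's three phases (min-length scan, filter pass, sort of the filtered subset, index) by a single linear pass that keeps the running best string under the composite order (length, lexicographic).
import Mathlib
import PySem

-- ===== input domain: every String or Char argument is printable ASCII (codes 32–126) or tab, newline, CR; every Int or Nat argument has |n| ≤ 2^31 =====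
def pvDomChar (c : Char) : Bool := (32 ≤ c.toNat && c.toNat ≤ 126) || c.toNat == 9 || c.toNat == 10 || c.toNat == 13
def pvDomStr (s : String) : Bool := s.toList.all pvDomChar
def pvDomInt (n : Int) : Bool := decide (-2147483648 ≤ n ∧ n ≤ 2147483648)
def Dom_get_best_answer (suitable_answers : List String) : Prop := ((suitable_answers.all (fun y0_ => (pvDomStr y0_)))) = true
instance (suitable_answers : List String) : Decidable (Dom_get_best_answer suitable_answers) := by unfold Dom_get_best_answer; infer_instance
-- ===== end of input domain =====

-- B replaces A's three phases (min-length scan, filter, sort of the filtered subset, index)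
-- by one linear pass keeping the running best under the order (length, lexicographic): simpler.

-- ===== PORT A =====
def get_best_answer (suitable_answers : List String) : String :=
  let min_size : Int :=
    (PySem.List.pyRange 0 (PySem.List.len suitable_answers) 1).foldl
      (fun min_size i =>
        if PySem.Str.len (PySem.List.pyGetD suitable_answers i "") < min_size
        then PySem.Str.len (PySem.List.pyGetD suitable_answers i "")
        else min_size) 10000000
  let best_answers : List String :=
    (PySem.List.pyRange 0 (PySem.List.len suitable_answers) 1).foldl
      (fun best_answers i =>
        if PySem.Str.len (PySem.List.pyGetD suitable_answers i "") = min_size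
        then best_answers ++ [PySem.List.pyGetD suitable_answers i ""]
        else best_answers) []
  let best_answers := PySem.List.sorted best_answers (fun x => x) false
  -- best_answers[0]: IndexError (none) is excluded by Pre_get_best_answer
  (PySem.List.pyGet? best_answers 0).getD ""

-- ===== PORT B =====
def get_best_answer_alt (suitable_answers : List String) : String :=
  -- on [] the Python B returns None (outside Pre_); the port defaults to ""
  (suitable_answers.foldl
    (fun best s =>
      match best with
      | none => some s
      | some b =>
        if PySem.Str.len s < PySem.Str.len b ∨ (PySem.Str.len s = PySem.Str.len b ∧ s < b)
        then some s else some b) none).getD ""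

-- ===== PRECONDITION & SPEC =====
-- Pre_ excludes exactly the inputs where A's best_answers[0] raises IndexError:
-- the empty list, and lists whose strings all have length ≥ 10000000 (the sentinel).
def Pre_get_best_answer (suitable_answers : List String) : Prop :=
  ∃ s ∈ suitable_answers, PySem.Str.len s < 10000000
instance (suitable_answers : List String) : Decidable (Pre_get_best_answer suitable_answers) := by unfold Pre_get_best_answer; infer_instance
def pvWitness_get_best_answer : List String := (["ab", "c", "d"])
def Spec_get_best_answer (suitable_answers : List String) (out : String) : Prop := out = get_best_answer_alt suitable_answers
instance (suitable_answers : List String) (out : String) : Decidable (Spec_get_best_answer suitable_answers out) := by unfold Spec_get_best_answer; infer_instance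

-- ===== CLAIM (what is proved, stated in full; the proofs are below) =====
def Claim_equal_get_best_answer : Prop := ∀ (suitable_answers : List String), Dom_get_best_answer suitable_answers → Pre_get_best_answer suitable_answers → Spec_get_best_answer suitable_answers (get_best_answer suitable_answers)

-- ===== LEMMAS AND PROOFS =====

-- "a is at least as good as b" under the composite order (length, lexicographic)
def pvGood (a b : String) : Prop :=
  PySem.Str.len a < PySem.Str.len b ∨ (PySem.Str.len a = PySem.Str.len b ∧ a ≤ b)

theorem pvGood_refl (a : String) : pvGood a a := Or.inr ⟨rfl, le_refl a⟩

theorem pvGood_trans {a b c : String} (h1 : pvGood a b) (h2 : pvGood b c) : pvGood a c := by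
  rcases h1 with h1 | ⟨h1, h1'⟩ <;> rcases h2 with h2 | ⟨h2, h2'⟩
  · exact Or.inl (lt_trans h1 h2)
  · exact Or.inl (h2 ▸ h1)
  · exact Or.inl (h1 ▸ h2)
  · exact Or.inr ⟨h1.trans h2, le_trans h1' h2'⟩

-- A's first loop computes the minimum length (capped at the initial value c)
theorem pvMin_spec (xs : List String) (c : Int) :
    (∀ s ∈ xs, xs.foldl (fun a s => if PySem.Str.len s < a then PySem.Str.len s else a) c
        ≤ PySem.Str.len s) ∧
      xs.foldl (fun a s => if PySem.Str.len s < a then PySem.Str.len s else a) c ≤ c ∧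
      (xs.foldl (fun a s => if PySem.Str.len s < a then PySem.Str.len s else a) c = c ∨
        ∃ s ∈ xs, PySem.Str.len s =
          xs.foldl (fun a s => if PySem.Str.len s < a then PySem.Str.len s else a) c) := by
  induction xs generalizing c with
  | nil => exact ⟨by simp, le_refl c, Or.inl rfl⟩
  | cons x t ih =>
    simp only [List.foldl_cons]
    by_cases hx : PySem.Str.len x < c
    · simp only [if_pos hx]
      obtain ⟨h1, h2, h3⟩ := ih (PySem.Str.len x)
      refine ⟨?_, le_of_lt (lt_of_le_of_lt h2 hx), ?_⟩
      · intro s hs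
        rcases List.mem_cons.mp hs with rfl | hs
        · exact h2
        · exact h1 s hs
      · rcases h3 with h3 | ⟨s, hs, hls⟩
        · exact Or.inr ⟨x, List.mem_cons_self .., h3.symm⟩
        · exact Or.inr ⟨s, List.mem_cons_of_mem _ hs, hls⟩
    · simp only [if_neg hx]
      obtain ⟨h1, h2, h3⟩ := ih c
      refine ⟨?_, h2, ?_⟩
      · intro s hs
        rcases List.mem_cons.mp hs with rfl | hs
        · exact le_trans h2 (le_of_not_gt hx)
        · exact h1 s hs
      · rcases h3 with h3 | ⟨s, hs, hls⟩
        · exact Or.inl h3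
        · exact Or.inr ⟨s, List.mem_cons_of_mem _ hs, hls⟩

-- A's second loop is a filter
theorem pvFilter_spec (xs : List String) (m : Int) (acc : List String) :
    xs.foldl (fun acc s => if PySem.Str.len s = m then acc ++ [s] else acc) acc
      = acc ++ xs.filter (fun s => PySem.Str.len s = m) := by
  induction xs generalizing acc with
  | nil => simp
  | cons x t ih =>
    simp only [List.foldl_cons, List.filter_cons]
    by_cases hx : PySem.Str.len x = m
    · simp only [if_pos hx, decide_eq_true hx, ih]
      simp
    · simp only [if_neg hx, decide_eq_false hx, ih]
      simp

-- the pure step of B's loop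
def pvStep (b s : String) : String :=
  if PySem.Str.len s < PySem.Str.len b ∨ (PySem.Str.len s = PySem.Str.len b ∧ s < b)
  then s else b

theorem pvStep_good_left (b s : String) : pvGood (pvStep b s) b := by
  unfold pvStep
  split_ifs with h
  · rcases h with h | ⟨h, h'⟩
    · exact Or.inl h
    · exact Or.inr ⟨h, le_of_lt h'⟩
  · exact pvGood_refl b

theorem pvStep_good_right (b s : String) : pvGood (pvStep b s) s := by
  unfold pvStep
  split_ifs with h
  · exact pvGood_refl s
  · push Not at h
    obtain ⟨h1, h2⟩ := h
    rcases lt_or_eq_of_le h1 with hlt | heq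
    · exact Or.inl hlt
    · exact Or.inr ⟨heq, le_of_not_gt (h2 heq.symm)⟩

-- B's loop from `some b` stays `some` and computes the pure fold
theorem pvAlt_fold_some (xs : List String) (b : String) :
    xs.foldl
      (fun best s =>
        match best with
        | none => some s
        | some b =>
          if PySem.Str.len s < PySem.Str.len b ∨ (PySem.Str.len s = PySem.Str.len b ∧ s < b)
          then some s else some b) (some b) = some (xs.foldl pvStep b) := by
  induction xs generalizing b with
  | nil => rfl
  | cons x t ih => simpa [pvStep, apply_ite some] using ih (pvStep b x)

-- the pure fold's result is a member (or the seed) and is good against everything seen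
theorem pvFold_spec (xs : List String) (b : String) :
    (xs.foldl pvStep b = b ∨ xs.foldl pvStep b ∈ xs) ∧
      pvGood (xs.foldl pvStep b) b ∧ ∀ y ∈ xs, pvGood (xs.foldl pvStep b) y := by
  induction xs generalizing b with
  | nil => exact ⟨Or.inl rfl, pvGood_refl b, by simp⟩
  | cons x t ih =>
    simp only [List.foldl_cons]
    obtain ⟨h1, h2, h3⟩ := ih (pvStep b x)
    constructor
    · rcases h1 with h1 | h1
      · rw [h1]
        unfold pvStep
        split_ifs
        · exact Or.inr (List.mem_cons_self ..)
        · exact Or.inl rfl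
      · exact Or.inr (List.mem_cons_of_mem _ h1)
    · refine ⟨pvGood_trans h2 (pvStep_good_left b x), ?_⟩
      intro y hy
      rcases List.mem_cons.mp hy with rfl | hy
      · exact pvGood_trans h2 (pvStep_good_right b y)
      · exact h3 y hy

-- ===== VERDICT (by name: the statement is the Claim_ definition above) =====
theorem get_best_answer_spec : Claim_equal_get_best_answer := by
  intro xs _ hpre
  obtain ⟨s0, hs0, hs0len⟩ := hpre
  unfold Spec_get_best_answer get_best_answer get_best_answer_alt
  simp only []
  rw [PySem.List.foldl_pyRange_zero_pyGetD xs ""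
    (fun a s => if PySem.Str.len s < a then PySem.Str.len s else a) 10000000]
  set M : Int := xs.foldl (fun a s => if PySem.Str.len s < a then PySem.Str.len s else a) 10000000 with hM
  rw [PySem.List.foldl_pyRange_zero_pyGetD xs ""
    (fun acc s => if PySem.Str.len s = M then acc ++ [s] else acc) []]
  rw [pvFilter_spec xs M []]
  simp only [List.nil_append]
  obtain ⟨hmin, hcap, hmem⟩ := pvMin_spec xs 10000000
  rw [← hM] at hmin hcap hmem
  -- the filtered list is nonempty
  have hMne : ∃ s ∈ xs, PySem.Str.len s = M := by
    rcases hmem with h | h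
    · exfalso
      have := hmin s0 hs0
      omega
    · exact h
  obtain ⟨sm, hsm, hsmlen⟩ := hMne
  have hfilne : xs.filter (fun s => PySem.Str.len s = M) ≠ [] := by
    intro hnil
    have : sm ∈ xs.filter (fun s => PySem.Str.len s = M) :=
      List.mem_filter.mpr ⟨hsm, by simpa using hsmlen⟩
    rw [hnil] at this
    exact absurd this (List.not_mem_nil)
  -- name the head of the sorted filtered list
  have hsortne : PySem.List.sorted (xs.filter (fun s => PySem.Str.len s = M)) (fun x => x) false ≠ [] := by
    simp only [ne_eq, PySem.List.sorted_eq_nil_iff]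
    exact hfilne
  obtain ⟨h, t, hht⟩ : ∃ h t,
      PySem.List.sorted (xs.filter (fun s => PySem.Str.len s = M)) (fun x => x) false = h :: t := by
    rcases hsort : PySem.List.sorted (xs.filter (fun s => PySem.Str.len s = M)) (fun x => x) false with
      _ | ⟨h, t⟩
    · exact absurd hsort hsortne
    · exact ⟨h, t, rfl⟩
  rw [hht]
  simp only [PySem.List.pyGet?_zero_cons, Option.getD_some]
  -- h is the least string among those of minimal length M
  have hhle : ∀ y ∈ xs.filter (fun s => PySem.Str.len s = M), h ≤ y :=
    PySem.List.key_head_sorted_le _ (fun x => x) hht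
  have hhmem : h ∈ xs.filter (fun s => PySem.Str.len s = M) := by
    have : h ∈ PySem.List.sorted (xs.filter (fun s => PySem.Str.len s = M)) (fun x => x) false := by
      rw [hht]; exact List.mem_cons_self ..
    exact (PySem.List.mem_sorted ..).mp this
  obtain ⟨hhxs, hhlen⟩ := List.mem_filter.mp hhmem
  have hhlenM : PySem.Str.len h = M := by simpa using hhlen
  -- B's result
  rcases xs with _ | ⟨x, t'⟩
  · exact absurd hs0 (List.not_mem_nil)
  rw [List.foldl_cons]
  rw [pvAlt_fold_some]
  simp only [Option.getD_some]
  set r : String := t'.foldl pvStep x with hr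
  obtain ⟨hrmem, hrx, hrall⟩ := pvFold_spec t' x
  rw [← hr] at hrmem hrx hrall
  have hrin : r ∈ x :: t' := by
    rcases hrmem with h | h
    · rw [h]; exact List.mem_cons_self ..
    · exact List.mem_cons_of_mem _ h
  have hrgood : ∀ y ∈ x :: t', pvGood r y := by
    intro y hy
    rcases List.mem_cons.mp hy with rfl | hy
    · exact hrx
    · exact hrall y hy
  -- len r = M
  have hrM : PySem.Str.len r = M := by
    have h1 : M ≤ PySem.Str.len r := hmin r hrin
    have h2 : pvGood r h := hrgood h hhxs
    rcases h2 with h2 | ⟨h2, _⟩ <;> omega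
  -- h ≤ r since r is in the filter
  have hhr : h ≤ r := hhle r (List.mem_filter.mpr ⟨hrin, by simpa using hrM⟩)
  -- r ≤ h from pvGood r h with equal lengths
  have hrh : r ≤ h := by
    rcases hrgood h hhxs with h2 | ⟨_, h2⟩
    · omega
    · exact h2
  exact le_antisymm hhr hrh
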